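-- pv_equiv track=rewrite | github.com/Anuj2004jain/Smart-Translator | new/test3.py | apply_hindi_grammar
-- ===== SOURCE A (Python) =====
-- def apply_hindi_grammar(translations):
--     subject = []
--     objects = []
--     verbs = []
--     auxiliaries = []
--
--     for word, pos in translations:
--         if pos in {"NN", "PRP", "PRP$"}:
--             subject.append(word)
--         elif pos in {"JJ", "IN", "CC"}:
--             objects.append(word)
--         elif pos.startswith("VB") or pos == "VBG":
--             verbs.append(word)
--         elif pos in {"VBP", "VBD", "VBP_FUTURE"}:
--             auxiliaries.append(word)
--
--     # Construct Hindi sentence: Subject → Object → Verb → Auxiliary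
--     return " ".join(subject + objects + verbs + auxiliaries)
-- ===== SOURCE B (Python) =====
-- def apply_hindi_grammar(translations):
--     def priority(pos):
--         if pos in ("NN", "PRP", "PRP$"):
--             return 0
--         if pos in ("JJ", "IN", "CC"):
--             return 1
--         if pos.startswith("VB"):
--             return 2
--         return None
--
--     kept = [(w, priority(p)) for w, p in translations if priority(p) is not None]
--     kept.sort(key=lambda wp: wp[1])
--     return " ".join(w for w, _ in kept)
-- ===== Notes on version B (the rewrite author's own statement) =====
-- stated objective: alternative
-- what changed: B replaces A's four explicit category buckets and concatenation by a single category-priority key function, a filter, and one stable sort by that key.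
import Mathlib
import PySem

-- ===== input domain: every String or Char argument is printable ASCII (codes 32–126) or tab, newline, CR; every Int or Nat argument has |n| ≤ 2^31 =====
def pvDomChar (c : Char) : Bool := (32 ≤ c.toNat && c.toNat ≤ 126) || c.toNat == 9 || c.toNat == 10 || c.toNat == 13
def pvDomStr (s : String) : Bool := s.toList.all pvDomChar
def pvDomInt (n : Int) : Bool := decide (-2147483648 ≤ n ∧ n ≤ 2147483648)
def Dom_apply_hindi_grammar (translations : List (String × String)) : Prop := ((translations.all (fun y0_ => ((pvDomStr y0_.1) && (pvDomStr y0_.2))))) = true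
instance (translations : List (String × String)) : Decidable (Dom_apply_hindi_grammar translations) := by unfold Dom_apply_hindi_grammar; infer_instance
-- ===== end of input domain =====

-- B reorders the words by one stable sort on a 3-valued category-priority key instead of A's four explicit buckets; alternative decomposition, same behaviour.


-- ===== PORT A =====
-- one loop step: dispatch (word, pos) into the four buckets, same branch order as A
def ahgStep (st : List String × List String × List String × List String)
    (wp : String × String) : List String × List String × List String × List String :=
  if wp.2 = "NN" ∨ wp.2 = "PRP" ∨ wp.2 = "PRP$" then
    (st.1 ++ [wp.1], st.2.1, st.2.2.1, st.2.2.2)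
  else if wp.2 = "JJ" ∨ wp.2 = "IN" ∨ wp.2 = "CC" then
    (st.1, st.2.1 ++ [wp.1], st.2.2.1, st.2.2.2)
  else if PySem.Str.startswith wp.2 "VB" = true ∨ wp.2 = "VBG" then
    (st.1, st.2.1, st.2.2.1 ++ [wp.1], st.2.2.2)
  else if wp.2 = "VBP" ∨ wp.2 = "VBD" ∨ wp.2 = "VBP_FUTURE" then
    (st.1, st.2.1, st.2.2.1, st.2.2.2 ++ [wp.1])
  else st

def apply_hindi_grammar (translations : List (String × String)) : String :=
  let st := translations.foldl ahgStep ([], [], [], [])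
  PySem.Str.join " " (st.1 ++ st.2.1 ++ st.2.2.1 ++ st.2.2.2)

-- ===== PORT B =====
-- category priority of a POS tag; none = the word is dropped
def ahgPriority (pos : String) : Option Int :=
  if pos = "NN" ∨ pos = "PRP" ∨ pos = "PRP$" then some 0
  else if pos = "JJ" ∨ pos = "IN" ∨ pos = "CC" then some 1
  else if PySem.Str.startswith pos "VB" = true then some 2
  else none

def apply_hindi_grammar_alt (translations : List (String × String)) : String :=
  let kept := (translations.filter (fun wp => (ahgPriority wp.2).isSome)).map
    (fun wp => (wp.1, (ahgPriority wp.2).getD 0))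
  PySem.Str.join " "
    ((PySem.List.sorted kept (fun wp => wp.2) false).map Prod.fst)

-- ===== PRECONDITION & SPEC =====
def Spec_apply_hindi_grammar (translations : List (String × String)) (out : String) : Prop := out = apply_hindi_grammar_alt translations
instance (translations : List (String × String)) (out : String) : Decidable (Spec_apply_hindi_grammar translations out) := by unfold Spec_apply_hindi_grammar; infer_instance

-- ===== CLAIM (what is proved, stated in full; the proofs are below) =====
def Claim_equal_apply_hindi_grammar : Prop := ∀ (translations : List (String × String)), Dom_apply_hindi_grammar translations → Spec_apply_hindi_grammar translations (apply_hindi_grammar translations)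

-- ===== LEMMAS AND PROOFS =====

-- words of category i, in input order
def ahgCat (i : Int) (ts : List (String × String)) : List String :=
  (ts.filter (fun wp => ahgPriority wp.2 = some i)).map Prod.fst

theorem ahgPriority_cases (p : String) :
    ahgPriority p = none ∨ ahgPriority p = some 0 ∨ ahgPriority p = some 1 ∨ ahgPriority p = some 2 := by
  unfold ahgPriority; split_ifs <;> simp

theorem startswith_of_VBG : PySem.Str.startswith "VBG" "VB" = true := by decide
theorem startswith_of_VBP : PySem.Str.startswith "VBP" "VB" = true := by decide
theorem startswith_of_VBD : PySem.Str.startswith "VBD" "VB" = true := by decide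
theorem startswith_of_VBPF : PySem.Str.startswith "VBP_FUTURE" "VB" = true := by decide

-- A's foldl produces exactly the three category lists (auxiliaries stay empty)
theorem ahg_fold (ts : List (String × String)) (s o v a : List String) :
    ts.foldl ahgStep (s, o, v, a) =
      (s ++ ahgCat 0 ts, o ++ ahgCat 1 ts, v ++ ahgCat 2 ts, a) := by
  induction ts generalizing s o v a with
  | nil => simp [ahgCat]
  | cons wp rest ih =>
    obtain ⟨w, p⟩ := wp
    rw [List.foldl_cons]
    by_cases h0 : p = "NN" ∨ p = "PRP" ∨ p = "PRP$"
    · have hstep : ahgStep (s, o, v, a) (w, p) = (s ++ [w], o, v, a) := by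
        unfold ahgStep; rw [if_pos h0]
      rw [hstep, ih]
      have hp : ahgPriority p = some 0 := by unfold ahgPriority; rw [if_pos h0]
      simp [ahgCat, hp, List.append_assoc]
    · by_cases h1 : p = "JJ" ∨ p = "IN" ∨ p = "CC"
      · have hstep : ahgStep (s, o, v, a) (w, p) = (s, o ++ [w], v, a) := by
          unfold ahgStep; rw [if_neg h0, if_pos h1]
        rw [hstep, ih]
        have hp : ahgPriority p = some 1 := by unfold ahgPriority; rw [if_neg h0, if_pos h1]
        simp [ahgCat, hp, List.append_assoc]
      · by_cases h2 : PySem.Str.startswith p "VB" = true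
        · have hstep : ahgStep (s, o, v, a) (w, p) = (s, o, v ++ [w], a) := by
            unfold ahgStep; rw [if_neg h0, if_neg h1, if_pos (Or.inl h2)]
          rw [hstep, ih]
          have hp : ahgPriority p = some 2 := by unfold ahgPriority; rw [if_neg h0, if_neg h1, if_pos h2]
          simp [ahgCat, hp, List.append_assoc]
        · have hnv : ¬(PySem.Str.startswith p "VB" = true ∨ p = "VBG") := by
            rintro (h | h)
            · exact h2 h
            · exact h2 (h ▸ startswith_of_VBG)
          have h3 : ¬(p = "VBP" ∨ p = "VBD" ∨ p = "VBP_FUTURE") := by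
            rintro (h | h | h)
            · exact h2 (h ▸ startswith_of_VBP)
            · exact h2 (h ▸ startswith_of_VBD)
            · exact h2 (h ▸ startswith_of_VBPF)
          have hstep : ahgStep (s, o, v, a) (w, p) = (s, o, v, a) := by
            unfold ahgStep; rw [if_neg h0, if_neg h1, if_neg hnv, if_neg h3]
          rw [hstep, ih]
          have hp : ahgPriority p = none := by unfold ahgPriority; rw [if_neg h0, if_neg h1, if_neg h2]
          simp [ahgCat, hp]

-- insertBy skips a prefix it is not 'before' and lands in front of a block it is 'before'
theorem insertBy_skip_front {α : Type} (before : α → α → Bool) (x : α) (u v : List α)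
    (hu : ∀ a ∈ u, before x a = false) (hv : ∀ a ∈ v, before x a = true) :
    PySem.List.insertBy before x (u ++ v) = u ++ x :: v := by
  induction u with
  | nil =>
    cases v with
    | nil => simp [PySem.List.insertBy]
    | cons y ys => simp [PySem.List.insertBy, hv y (by simp)]
  | cons y ys ih =>
    have hy : before x y = false := hu y (by simp)
    simp only [List.cons_append, PySem.List.insertBy, hy, Bool.false_eq_true, if_false,
      List.cons.injEq, true_and]
    exact ih (fun a ha => hu a (by simp [ha])) 

-- the keys of B's kept list are 0, 1 or 2
def ahgKept (ts : List (String × String)) : List (String × Int) :=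
  (ts.filter (fun wp => (ahgPriority wp.2).isSome)).map
    (fun wp => (wp.1, (ahgPriority wp.2).getD 0))

theorem kept_keys (ts : List (String × String)) :
    ∀ q ∈ ahgKept ts, q.2 = 0 ∨ q.2 = 1 ∨ q.2 = 2 := by
  intro q hq
  simp only [ahgKept, List.mem_map, List.mem_filter] at hq
  obtain ⟨wp, ⟨_, hs⟩, rfl⟩ := hq
  rcases ahgPriority_cases wp.2 with h | h | h | h <;> simp [h] at hs ⊢

-- a stable sort by a {0,1,2}-valued key is the three key-filters concatenated
theorem sorted_three (l : List (String × Int))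
    (h : ∀ q ∈ l, q.2 = 0 ∨ q.2 = 1 ∨ q.2 = 2) :
    PySem.List.sorted l (fun wp => wp.2) false =
      l.filter (fun q => q.2 = 0) ++ l.filter (fun q => q.2 = 1) ++ l.filter (fun q => q.2 = 2) := by
  induction l using List.reverseRecOn with
  | nil => simp [PySem.List.sorted_eq_foldl_insertBy]
  | append_singleton t x ih =>
    have ht : ∀ q ∈ t, q.2 = 0 ∨ q.2 = 1 ∨ q.2 = 2 := fun q hq => h q (by simp [hq])
    have hstep : PySem.List.sorted (t ++ [x]) (fun wp => wp.2) false =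
        PySem.List.insertBy (fun a b => decide ((fun wp : String × Int => wp.2) a < (fun wp : String × Int => wp.2) b)) x
          (PySem.List.sorted t (fun wp => wp.2) false) := by
      rw [PySem.List.sorted_eq_foldl_insertBy, PySem.List.sorted_eq_foldl_insertBy, List.foldl_append]
      rfl
    rw [hstep, ih ht]
    have mem0 : ∀ a ∈ t.filter (fun q => q.2 = 0), a.2 = (0 : Int) := by
      intro a ha; simpa using (List.mem_filter.mp ha).2
    have mem1 : ∀ a ∈ t.filter (fun q => q.2 = 1), a.2 = (1 : Int) := by
      intro a ha; simpa using (List.mem_filter.mp ha).2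
    have mem2 : ∀ a ∈ t.filter (fun q => q.2 = 2), a.2 = (2 : Int) := by
      intro a ha; simpa using (List.mem_filter.mp ha).2
    rcases h x (by simp) with hx | hx | hx
    · -- key 0: skip filter-0 block, insert before the 1/2 blocks
      rw [List.append_assoc,
        insertBy_skip_front _ x (t.filter (fun q => q.2 = 0))
          (t.filter (fun q => q.2 = 1) ++ t.filter (fun q => q.2 = 2))
          (by intro a ha; simp [mem0 a ha, hx])
          (by intro a ha
              rcases List.mem_append.mp ha with h' | h'
              · simp [hx, mem1 a h']
              · simp [hx, mem2 a h'])]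
      simp [List.filter_append, hx, List.append_assoc]
    · -- key 1: skip filter-0 and filter-1, insert before filter-2
      rw [insertBy_skip_front _ x (t.filter (fun q => q.2 = 0) ++ t.filter (fun q => q.2 = 1))
          (t.filter (fun q => q.2 = 2))
          (by intro a ha
              rcases List.mem_append.mp ha with h' | h'
              · simp [hx, mem0 a h']
              · simp [hx, mem1 a h'])
          (by intro a ha; simp [hx, mem2 a ha])]
      simp [List.filter_append, hx, List.append_assoc]
    · -- key 2: goes at the very end
      rw [PySem.List.insertBy_of_forall_not_before]
      · simp [List.filter_append, hx, List.append_assoc]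
      · intro a ha
        rcases List.mem_append.mp ha with h' | h'
        · rcases List.mem_append.mp h' with h'' | h''
          · simp [hx, mem0 a h'']
          · simp [hx, mem1 a h'']
        · simp [hx, mem2 a h']

-- the key-i filter of the kept list is exactly the category-i word list
theorem kept_filter_eq_cat (ts : List (String × String)) (i : Int) (hi : i = 0 ∨ i = 1 ∨ i = 2) :
    ((ahgKept ts).filter (fun q => q.2 = i)).map Prod.fst = ahgCat i ts := by
  induction ts with
  | nil => simp [ahgKept, ahgCat]
  | cons wp rest ih =>
    simp only [ahgKept, ahgCat] at ih ⊢
    rcases ahgPriority_cases wp.2 with h | h | h | h <;>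
      · simp only [List.filter_cons, h, Option.isSome_some, Option.isSome_none, if_true,
          List.map_cons, Option.getD_some]
        first
        | exact ih
        | (by_cases hx : i = 0 <;> by_cases hy : i = 1 <;> by_cases hz : i = 2 <;>
            simp_all)

theorem apply_hindi_grammar_eq (ts : List (String × String)) :
    apply_hindi_grammar ts = apply_hindi_grammar_alt ts := by
  unfold apply_hindi_grammar apply_hindi_grammar_alt
  dsimp only
  rw [ahg_fold ts [] [] [] []]
  rw [show ((ts.filter (fun wp => (ahgPriority wp.2).isSome)).map
      (fun wp => (wp.1, (ahgPriority wp.2).getD 0))) = ahgKept ts from rfl]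
  rw [sorted_three (ahgKept ts) (kept_keys ts)]
  simp only [List.map_append, List.nil_append,
    kept_filter_eq_cat ts 0 (by left; rfl),
    kept_filter_eq_cat ts 1 (by right; left; rfl),
    kept_filter_eq_cat ts 2 (by right; right; rfl), List.append_nil]

-- ===== VERDICT (by name: the statement is the Claim_ definition above) =====
theorem apply_hindi_grammar_spec : Claim_equal_apply_hindi_grammar := by
  intro ts _
  unfold Spec_apply_hindi_grammar
  exact apply_hindi_grammar_eq ts
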